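-- pv_equiv track=rewrite | github.com/bufebaa/python | Homework1/task3.py | Check_formula
-- ===== SOURCE A (Python) =====
-- def Check_formula(expresion):
--     operation = ['+', '-']
--     prev_element = None
--     flag = True
--     for el in expresion:
--         if not (el.isdigit() or (el in operation and prev_element not in operation)):
--             return False
--         prev_element = el
--     return True
-- ===== SOURCE B (Python) =====
-- def Check_formula(expresion):
--     if not all(c.isdigit() or c in '+-' for c in expresion):
--         return False
--     return not any(a in '+-' and b in '+-' for a, b in zip(expresion, expresion[1:]))
-- ===== Notes on version B (the rewrite author's own statement) =====
-- stated objective: simpler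
-- what changed: Replaces the single stateful scan carrying prev_element with two independent passes: an all() membership check plus a zip-pairwise check for adjacent operators.
import Mathlib
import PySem

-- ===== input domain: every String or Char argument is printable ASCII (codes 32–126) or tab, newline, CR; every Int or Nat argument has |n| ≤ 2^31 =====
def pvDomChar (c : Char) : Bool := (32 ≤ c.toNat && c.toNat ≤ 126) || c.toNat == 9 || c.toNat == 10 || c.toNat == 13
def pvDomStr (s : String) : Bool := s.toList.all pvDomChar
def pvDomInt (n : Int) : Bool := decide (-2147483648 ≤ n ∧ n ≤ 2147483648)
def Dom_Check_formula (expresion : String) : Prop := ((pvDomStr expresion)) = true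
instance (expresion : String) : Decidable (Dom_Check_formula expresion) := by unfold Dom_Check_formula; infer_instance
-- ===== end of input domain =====

-- B changes the decomposition only: two independent passes (membership all-check + pairwise zip adjacency check) instead of A's stateful early-return scan; same cost.

-- ===== PORT A =====
-- A's loop: early-return scan carrying prev_element (None before the first iteration).
def checkFormulaLoop : List Char → Option Char → Bool
  | [], _ => true
  | el :: rest, prev =>
    if !(PySem.Chars.isdigit el ||
         ((el == '+' || el == '-') &&
          !(match prev with | none => false | some p => (p == '+' || p == '-')))) then
      false
    else
      checkFormulaLoop rest (some el)

def Check_formula (expresion : String) : Bool :=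
  checkFormulaLoop expresion.toList none

-- ===== PORT B =====
def Check_formula_alt (expresion : String) : Bool :=
  if !(expresion.toList.all (fun c => PySem.Chars.isdigit c || (c == '+' || c == '-'))) then
    false
  else
    !((expresion.toList.zip expresion.toList.tail).any (fun p =>
        (p.1 == '+' || p.1 == '-') && (p.2 == '+' || p.2 == '-')))

-- ===== PRECONDITION & SPEC =====
def Spec_Check_formula (expresion : String) (out : Bool) : Prop := out = Check_formula_alt expresion
instance (expresion : String) (out : Bool) : Decidable (Spec_Check_formula expresion out) := by unfold Spec_Check_formula; infer_instance

-- ===== CLAIM (what is proved, stated in full; the proofs are below) =====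
def Claim_equal_Check_formula : Prop := ∀ (expresion : String), Dom_Check_formula expresion → Spec_Check_formula expresion (Check_formula expresion)

-- ===== LEMMAS AND PROOFS =====

def pvIsOp (c : Char) : Bool := c == '+' || c == '-'

def pvPrevOp : Option Char → Bool
  | none => false
  | some c => pvIsOp c

def pvGoodB (l : List Char) : Bool := l.all (fun c => PySem.Chars.isdigit c || pvIsOp c)

def pvHeadOp : List Char → Bool
  | [] => false
  | c :: _ => pvIsOp c

def pvAdjB : List Char → Bool
  | [] => true
  | [_] => true
  | a :: b :: t => !(pvIsOp a && pvIsOp b) && pvAdjB (b :: t)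

theorem pvAdjB_cons (c : Char) (l : List Char) :
    pvAdjB (c :: l) = (!(pvIsOp c && pvHeadOp l) && pvAdjB l) := by
  cases l <;> simp [pvAdjB, pvHeadOp]

theorem checkFormulaLoop_eq (l : List Char) : ∀ (prev : Option Char),
    checkFormulaLoop l prev =
      (pvGoodB l && pvAdjB l && !(pvPrevOp prev && pvHeadOp l)) := by
  induction l with
  | nil => intro prev; simp [checkFormulaLoop, pvGoodB, pvAdjB, pvHeadOp]
  | cons c rest ih =>
    intro prev
    have hmatch : (match prev with | none => false | some p => (p == '+' || p == '-')) = pvPrevOp prev := by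
      cases prev <;> rfl
    simp only [checkFormulaLoop, hmatch, ih (some c), pvGoodB, List.all_cons,
      pvAdjB_cons, pvHeadOp, pvPrevOp]
    cases hoc : pvIsOp c with
    | false =>
      cases hdg : PySem.Chars.isdigit c with
      | false => simp [pvIsOp] at hoc; simp [hoc.1, hoc.2]
      | true =>
        simp [pvIsOp] at hoc
        simp_all [Bool.and_comm, Bool.and_assoc]
    | true =>
      rcases (show c = '+' ∨ c = '-' by simpa [pvIsOp] using hoc) with rfl | rfl <;>
      cases hpv : pvPrevOp prev <;>
        simp_all [pvIsOp, Bool.and_comm, Bool.and_left_comm, Bool.and_assoc] <;>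
        tauto

theorem zipAny_eq_adjB (l : List Char) :
    ((l.zip l.tail).any (fun p => (p.1 == '+' || p.1 == '-') && (p.2 == '+' || p.2 == '-'))) = !(pvAdjB l) := by
  induction l with
  | nil => simp [pvAdjB]
  | cons c rest ih =>
    cases rest with
    | nil => simp [pvAdjB]
    | cons d t =>
      simp only [List.tail_cons] at ih ⊢
      simp only [List.zip_cons_cons, List.any_cons, pvAdjB, ih, pvIsOp]
      cases pvAdjB (d :: t) <;> simp

-- ===== VERDICT (by name: the statement is the Claim_ definition above) =====
theorem Check_formula_spec : Claim_equal_Check_formula := by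
  intro e _
  unfold Spec_Check_formula Check_formula Check_formula_alt
  rw [checkFormulaLoop_eq, zipAny_eq_adjB]
  simp only [pvPrevOp, Bool.false_and, Bool.not_false, Bool.and_true]
  cases h : pvGoodB e.toList with
  | false => simp [pvGoodB, pvIsOp] at h ⊢; tauto
  | true =>
    simp only [pvGoodB, pvIsOp] at h
    simp [h, Bool.not_not]
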